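-- pv_equiv track=rewrite | github.com/GSA/datagov-harvester | harvester/utils/general_utils.py | find_indexes_for_duplicates
-- ===== SOURCE A (Python) =====
-- def find_indexes_for_duplicates(records: list):
--     """
--     output is a list of integers representing element positions of
--     duplicates records. this list is then used to record duplicate
--     record errors in the db and to remove from self.external_records.
--     sorting it in reverse (.sort edits in place) places the largest
--     numbers first. this is necessary to avoid index shifting
--     when you're deleting from a list.
--
--     scenario without sorting output
--         positions = [ 1, 3 ]
--         data = [ 0, 0, 1, 1 ]
--
--         deleting data[1] can shift the data since we're mutating the list.
--         what happens when we try to del data[3] on [0, 1, 1]?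
--     """
--     seen = set()
--     output = []
--     for i in range(len(records)):
--         identifier = records[i]["identifier"]
--         if identifier in seen:
--             output.append(i)
--         seen.add(identifier)
--     output.sort(reverse=True)  # avoid index shifting
--
--     return output
-- ===== SOURCE B (Python) =====
-- def find_indexes_for_duplicates(records: list):
--     # Group indexes by identifier, then keep everything but each group's
--     # first index; reverse-sort so deletions don't shift later positions.
--     groups = {}
--     for i, record in enumerate(records):
--         groups.setdefault(record["identifier"], []).append(i)
--     output = []
--     for indexes in groups.values():
--         output.extend(indexes[1:])
--     output.sort(reverse=True)
--     return output
-- ===== Notes on version B (the rewrite author's own statement) =====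
-- stated objective: alternative
-- what changed: Replaces the inline seen-set duplicate detection with a group-then-filter pass: one loop builds a dict mapping each identifier to all its indexes, then the non-first index of every group is collected and reverse-sorted.
import Mathlib
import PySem

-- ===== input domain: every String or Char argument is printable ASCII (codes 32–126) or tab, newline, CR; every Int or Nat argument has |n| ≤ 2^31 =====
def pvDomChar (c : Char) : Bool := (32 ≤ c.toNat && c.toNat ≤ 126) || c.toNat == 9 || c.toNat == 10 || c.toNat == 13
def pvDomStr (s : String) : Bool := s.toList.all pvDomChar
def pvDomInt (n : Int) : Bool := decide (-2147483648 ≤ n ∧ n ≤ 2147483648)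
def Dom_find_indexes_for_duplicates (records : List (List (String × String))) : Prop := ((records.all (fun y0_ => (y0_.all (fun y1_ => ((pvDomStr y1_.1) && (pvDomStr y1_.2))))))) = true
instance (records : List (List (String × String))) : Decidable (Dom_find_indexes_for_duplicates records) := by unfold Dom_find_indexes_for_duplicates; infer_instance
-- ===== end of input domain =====

-- B groups indexes by identifier and drops each group's first index, instead of A's
-- inline seen-set scan; same cost, alternative decomposition.

-- ===== PORT A =====
-- seen-set loop over range(len(records)); 'records[i]["identifier"]' is exact under
-- Pre_ (every record has the key), so the '.getD' defaults are never reached there.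
def find_indexes_for_duplicates (records : List (List (String × String))) : List Int :=
  let st := (PySem.List.pyRange 0 (PySem.List.len records) 1).foldl
    (fun (st : PySem.Set String × List Int) i =>
      let identifier := (PySem.Dict.mk (PySem.List.pyGetD records i [])).getD "identifier" ""
      (st.1.add identifier, if st.1.contains identifier then st.2 ++ [i] else st.2))
    (PySem.Set.empty, [])
  PySem.List.sorted st.2 (fun x => x) true

-- ===== PORT B =====
def find_indexes_for_duplicates_alt (records : List (List (String × String))) : List Int :=
  let groups : PySem.Dict String (List Int) :=
    (PySem.List.enumerate records).foldl
      (fun g p => g.modify ((PySem.Dict.mk p.2).getD "identifier" "") [] (fun v => v ++ [p.1]))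
      PySem.Dict.empty
  let output := groups.values.foldl (fun out idxs => out ++ PySem.List.slice idxs (some 1) none) []
  PySem.List.sorted output (fun x => x) true

-- ===== PRECONDITION & SPEC =====
-- Pre_ excludes exactly the records missing the "identifier" key, on which Python A
-- (and Python B alike) raises KeyError.
def Pre_find_indexes_for_duplicates (records : List (List (String × String))) : Prop :=
  ∀ r ∈ records, (PySem.Dict.mk r).contains "identifier" = true
instance (records : List (List (String × String))) : Decidable (Pre_find_indexes_for_duplicates records) := by unfold Pre_find_indexes_for_duplicates; infer_instance
def pvWitness_find_indexes_for_duplicates : (List (List (String × String))) :=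
  [[("identifier", "a")], [("identifier", "b")], [("identifier", "a")]]
def Spec_find_indexes_for_duplicates (records : List (List (String × String))) (out : List Int) : Prop := out = find_indexes_for_duplicates_alt records
instance (records : List (List (String × String))) (out : List Int) : Decidable (Spec_find_indexes_for_duplicates records out) := by unfold Spec_find_indexes_for_duplicates; infer_instance

-- ===== CLAIM (what is proved, stated in full; the proofs are below) =====
def Claim_equal_find_indexes_for_duplicates : Prop := ∀ (records : List (List (String × String))), Dom_find_indexes_for_duplicates records → Pre_find_indexes_for_duplicates records → Spec_find_indexes_for_duplicates records (find_indexes_for_duplicates records)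

-- ===== LEMMAS AND PROOFS =====


-- identifier of one record
def pvKey (r : List (String × String)) : String := (PySem.Dict.mk r).getD "identifier" ""

-- the indexes A's loop appends, starting from seen-set s
def pvDup (s : PySem.Set String) : List (Int × List (String × String)) → List Int
  | [] => []
  | (i, r) :: t => (if s.contains (pvKey r) then [i] else []) ++ pvDup (s.add (pvKey r)) t

-- A's loop step, on enumerated pairs
def pvStep (st : PySem.Set String × List Int) (p : Int × List (String × String)) :
    PySem.Set String × List Int :=
  (st.1.add (pvKey p.2), if st.1.contains (pvKey p.2) then st.2 ++ [p.1] else st.2)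

-- B's group for identifier c, given the (identifier, index) pairs
def pvG (e' : List (String × Int)) (c : String) : List Int :=
  ((e'.filter (fun p => p.1 == c)).map (fun p => p.2)).drop 1

-- the (identifier, index) pairs of the records
def pvE' (records : List (List (String × String))) : List (String × Int) :=
  (PySem.List.enumerate records).map (fun p => (pvKey p.2, p.1))

theorem pvA_loop (l : List (Int × List (String × String))) (s : PySem.Set String)
    (out : List Int) :
    l.foldl pvStep (s, out)
      = (PySem.Set.update s (l.map (fun p => pvKey p.2)), out ++ pvDup s l) := by
  induction l generalizing s out with
  | nil => simp [pvDup, PySem.Set.update]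
  | cons p t ih =>
    obtain ⟨i, r⟩ := p
    simp only [List.foldl_cons, pvStep, List.map_cons, pvDup]
    rw [ih]
    by_cases h : pvKey r ∈ s <;> simp [h, PySem.Set.update]

theorem pvA_eq (records : List (List (String × String))) :
    find_indexes_for_duplicates records
      = PySem.List.sorted (pvDup PySem.Set.empty (PySem.List.enumerate records))
          (fun x => x) true := by
  have h := pvA_loop (PySem.List.enumerate records) PySem.Set.empty []
  rw [PySem.List.enumerate_eq_map_pyRange records [], List.foldl_map] at h
  simp only [pvStep, pvKey] at h
  unfold find_indexes_for_duplicates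
  rw [PySem.List.enumerate_eq_map_pyRange records []]
  simp [pvKey] at h ⊢
  rw [h]

theorem pvB_eq (records : List (List (String × String))) :
    find_indexes_for_duplicates_alt records
      = PySem.List.sorted
          ((PySem.Set.ofList ((pvE' records).map (fun p => p.1))).flatMap (pvG (pvE' records)))
          (fun x => x) true := by
  unfold find_indexes_for_duplicates_alt
  have hfold :
      (PySem.List.enumerate records).foldl
          (fun g p => g.modify ((PySem.Dict.mk p.2).getD "identifier" "") [] (fun v => v ++ [p.1]))
          PySem.Dict.empty
        = (pvE' records).foldl
            (fun g q => g.modify q.1 [] (fun v => v ++ [q.2])) PySem.Dict.empty := by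
    rw [pvE', List.foldl_map]
    rfl
  rw [hfold]
  set groups := (pvE' records).foldl
      (fun g q => g.modify q.1 [] (fun v => v ++ [q.2])) PySem.Dict.empty with hg
  have hkeys : groups.keys = PySem.Set.ofList ((pvE' records).map (fun p => p.1)) := by
    rw [hg]
    have := PySem.Dict.keys_foldl_modify_key (pvE' records) (fun q => q.1) ([] : List Int)
      (fun _ q => fun v => v ++ [q.2]) PySem.Dict.empty
    simp only at this
    rw [this]
    simp only [PySem.Dict.keys_empty]
    rw [PySem.Set.ofList_eq_foldl]
    rfl
  have hnd : groups.keys.Nodup := by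
    rw [hg]
    exact PySem.Dict.nodup_keys_foldl_modify_key _ _ _ _ _ PySem.Dict.nodup_keys_empty
  have hget : ∀ c, groups.getD c [] = ((pvE' records).filter (fun p => p.1 == c)).map (fun p => p.2) := by
    intro c
    rw [hg]
    rw [PySem.Dict.getD_foldl_modify_append (pvE' records) PySem.Dict.empty c]
    simp [PySem.Dict.getD_empty]
  have hslice : ∀ idxs : List Int, PySem.List.slice idxs (some 1) none = idxs.drop 1 := by
    intro idxs
    rw [PySem.List.slice_from idxs (by norm_num : (0:Int) ≤ 1)]
    rfl
  have hvals : groups.values = groups.keys.map (fun k => groups.getD k []) :=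
    PySem.Dict.values_eq_map_keys groups hnd []
  simp only [hslice]
  rw [PySem.List.foldl_append_eq_flatMap, hvals, hkeys, List.nil_append, List.flatMap_map]
  congr 1
  apply List.flatMap_congr
  intro c _
  simp only [hget, pvG]

theorem pvDup_append (l₁ l₂ : List (Int × List (String × String))) (s : PySem.Set String) :
    pvDup s (l₁ ++ l₂)
      = pvDup s l₁ ++ pvDup (PySem.Set.update s (l₁.map (fun p => pvKey p.2))) l₂ := by
  induction l₁ generalizing s with
  | nil => simp [pvDup, PySem.Set.update]
  | cons p t ih =>
    obtain ⟨i, r⟩ := p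
    have hupd : PySem.Set.update s (pvKey r :: List.map (fun p => pvKey p.2) t)
        = PySem.Set.update (s.add (pvKey r)) (List.map (fun p => pvKey p.2) t) := by
      simp [PySem.Set.update]
    simp only [List.cons_append, pvDup, List.map_cons, hupd, ih, List.append_assoc]

theorem pvDup_subset (l : List (Int × List (String × String))) (s : PySem.Set String)
    (j : Int) (h : j ∈ pvDup s l) : j ∈ l.map (fun p => p.1) := by
  induction l generalizing s with
  | nil => simp [pvDup] at h
  | cons p t ih =>
    obtain ⟨i, r⟩ := p
    simp only [pvDup, List.mem_append] at h
    rcases h with h | h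
    · split at h <;> simp_all
    · simp [ih _ h]

theorem pvDup_pairwise (l : List (Int × List (String × String))) (s : PySem.Set String)
    (h : List.Pairwise (fun p q => p.1 < q.1) l) :
    (pvDup s l).Pairwise (· < ·) := by
  induction l generalizing s with
  | nil => simp [pvDup]
  | cons p t ih =>
    obtain ⟨i, r⟩ := p
    rw [List.pairwise_cons] at h
    simp only [pvDup]
    apply List.pairwise_append.mpr
    refine ⟨?_, ih _ h.2, ?_⟩
    · split <;> simp
    · intro a ha b hb
      have hb' := pvDup_subset _ _ _ hb
      simp only [List.mem_map] at hb'
      obtain ⟨q, hq, rfl⟩ := hb'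
      have : a = i := by split at ha <;> simp_all
      subst this
      exact h.1 q hq

theorem pv_ofList_snoc (ks : List String) (x : String) :
    PySem.Set.ofList (ks ++ [x])
      = if x ∈ PySem.Set.ofList ks then PySem.Set.ofList ks
        else PySem.Set.ofList ks ++ [x] := by
  rw [PySem.Set.ofList_eq_foldl, List.foldl_append]
  rw [← PySem.Set.ofList_eq_foldl]
  simp only [List.foldl_cons, List.foldl_nil, PySem.Set.add]
  by_cases h : x ∈ PySem.Set.ofList ks
  · simp [h]
  · have : (PySem.Set.ofList ks).contains x = false := by
      by_contra hc
      simp only [Bool.not_eq_false] at hc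
      exact h ((PySem.Set.contains_iff _ _).mp hc)
    simp [h]

theorem pvFlat_extend (g : String → List Int) (n : Int) (x : String) (L : List String)
    (hnd : L.Nodup) (hx : x ∈ L) :
    (L.flatMap (fun c => if c = x then g c ++ [n] else g c)).Perm (L.flatMap g ++ [n]) := by
  induction L with
  | nil => simp at hx
  | cons a t ih =>
    rw [List.nodup_cons] at hnd
    by_cases hax : a = x
    · subst hax
      have ht : t.flatMap (fun c => if c = a then g c ++ [n] else g c) = t.flatMap g := by
        apply List.flatMap_congr
        intro c hc
        have : c ≠ a := fun hca => hnd.1 (hca ▸ hc)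
        simp [this]
      simp only [List.flatMap_cons, ht]
      rw [if_pos trivial, List.append_assoc, List.append_assoc]
      exact List.Perm.append_left _ List.perm_append_comm
    · have hxt : x ∈ t := by
        rcases List.mem_cons.mp hx with h | h
        · exact absurd h.symm hax
        · exact h
      simp only [List.flatMap_cons, if_neg hax]
      rw [List.append_assoc]
      exact List.Perm.append_left _ (ih hnd.2 hxt)

theorem pvFilter_nil (e' : List (String × Int)) (x : String)
    (h : x ∉ e'.map (fun p => p.1)) : e'.filter (fun p => p.1 == x) = [] := by
  rw [List.filter_eq_nil_iff]
  intro p hp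
  simp only [beq_iff_eq]
  intro hpx
  exact h (List.mem_map.mpr ⟨p, hp, hpx⟩)

theorem pvDrop_snoc (l : List Int) (a : Int) (h : l ≠ []) :
    (l ++ [a]).drop 1 = l.drop 1 ++ [a] := by
  cases l with
  | nil => exact absurd rfl h
  | cons b t => simp

theorem pvPerm (records : List (List (String × String))) :
    (pvDup PySem.Set.empty (PySem.List.enumerate records)).Perm
      ((PySem.Set.ofList ((pvE' records).map (fun p => p.1))).flatMap (pvG (pvE' records))) := by
  induction records using List.reverseRecOn with
  | nil => simp [pvDup, pvE', PySem.List.enumerate, PySem.Set.ofList]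
  | append_singleton records r ih =>
    have henum : PySem.List.enumerate (records ++ [r])
        = PySem.List.enumerate records ++ [((records.length : Int), r)] := by
      rw [PySem.List.enumerate_append]
      simp [PySem.List.enumerate]
    set x := pvKey r with hx
    set nI : Int := (records.length : Int) with hnI
    set e' := pvE' records with he'
    set ks := e'.map (fun p => p.1) with hks
    have hE'new : pvE' (records ++ [r]) = e' ++ [(x, nI)] := by
      rw [pvE', henum, List.map_append]
      rfl
    have hksnew : (pvE' (records ++ [r])).map (fun p => p.1) = ks ++ [x] := by
      rw [hE'new, List.map_append]
      rfl
    have hidmap : (PySem.List.enumerate records).map (fun p => pvKey p.2) = ks := by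
      rw [hks, he', pvE', List.map_map]
      rfl
    -- LHS decomposition
    have hupd : PySem.Set.update PySem.Set.empty
          ((PySem.List.enumerate records).map (fun p => pvKey p.2)) = PySem.Set.ofList ks := by
      rw [hidmap, PySem.Set.ofList_eq_foldl]
      rfl
    have hLHS : pvDup PySem.Set.empty (PySem.List.enumerate (records ++ [r]))
        = pvDup PySem.Set.empty (PySem.List.enumerate records)
          ++ (if (PySem.Set.ofList ks).contains x then [nI] else []) := by
      rw [henum, pvDup_append, hupd]
      simp only [pvDup, List.append_nil, ← hx]
    -- filter of the extended pair list
    have hfilt : ∀ c, (e' ++ [(x, nI)]).filter (fun p => p.1 == c)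
        = e'.filter (fun p => p.1 == c) ++ (if x = c then [(x, nI)] else []) := by
      intro c
      rw [List.filter_append]
      congr 1
      by_cases h : x = c <;> simp [h]
    by_cases hmem : x ∈ ks
    · -- existing identifier: group x is extended by nI
      have hfne : e'.filter (fun p => p.1 == x) ≠ [] := by
        intro hnil
        obtain ⟨p, hp, hpx⟩ := List.mem_map.mp hmem
        have : p ∈ e'.filter (fun p => p.1 == x) := by
          rw [List.mem_filter]
          exact ⟨hp, by simp [hpx]⟩
        simp [hnil] at this
      have hGnew : ∀ c, pvG (pvE' (records ++ [r])) c
          = if c = x then pvG e' c ++ [nI] else pvG e' c := by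
        intro c
        rw [pvG, hE'new, hfilt c]
        by_cases h : c = x
        · rw [h, if_pos rfl, if_pos rfl, List.map_append]
          simp only [List.map_cons, List.map_nil]
          have hmne : (List.filter (fun p => p.1 == x) e').map (fun p => p.2) ≠ [] := by
            intro hm
            exact hfne (List.map_eq_nil_iff.mp hm)
          rw [pvDrop_snoc _ _ hmne, pvG]
        · rw [if_neg (fun hh => h hh.symm), if_neg h, List.append_nil, pvG]
      have hofl : PySem.Set.ofList (ks ++ [x]) = PySem.Set.ofList ks := by
        rw [pv_ofList_snoc, if_pos ((PySem.Set.mem_ofList ks x).mpr hmem)]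
      rw [hLHS, hksnew, hofl]
      rw [if_pos ((PySem.Set.contains_iff _ _).mpr ((PySem.Set.mem_ofList ks x).mpr hmem))]
      have hfm : (PySem.Set.ofList ks).flatMap (pvG (pvE' (records ++ [r])))
          = (PySem.Set.ofList ks).flatMap (fun c => if c = x then pvG e' c ++ [nI] else pvG e' c) := by
        apply List.flatMap_congr
        intro c _
        exact hGnew c
      rw [hfm]
      have hext := pvFlat_extend (pvG e') nI x (PySem.Set.ofList ks)
        (PySem.Set.nodup_ofList ks) ((PySem.Set.mem_ofList ks x).mpr hmem)
      exact (ih.append_right [nI]).trans hext.symm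
    · -- fresh identifier: a new singleton group, nothing added
      have hofl : PySem.Set.ofList (ks ++ [x]) = PySem.Set.ofList ks ++ [x] := by
        rw [pv_ofList_snoc, if_neg (fun h => hmem ((PySem.Set.mem_ofList ks x).mp h))]
      have hcont : (PySem.Set.ofList ks).contains x = false := by
        by_contra hc
        simp only [Bool.not_eq_false] at hc
        exact hmem ((PySem.Set.mem_ofList ks x).mp ((PySem.Set.contains_iff _ _).mp hc))
      rw [hLHS, hksnew, hofl, hcont]
      simp only [Bool.false_eq_true, if_false, List.append_nil]
      rw [List.flatMap_append]
      have hGx : pvG (pvE' (records ++ [r])) x = [] := by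
        rw [pvG, hE'new, hfilt x, if_pos rfl, pvFilter_nil e' x hmem]
        simp
      have hGold : ∀ c ∈ PySem.Set.ofList ks, pvG (pvE' (records ++ [r])) c = pvG e' c := by
        intro c hc
        have hck : c ∈ ks := (PySem.Set.mem_ofList ks c).mp hc
        have hcx : x ≠ c := by
          intro h
          exact hmem (by rw [h]; exact hck)
        rw [pvG, hE'new, hfilt c, if_neg hcx, List.append_nil, pvG]
      rw [List.flatMap_congr hGold]
      simp [hGx]
      exact ih


-- ===== VERDICT (by name: the statement is the Claim_ definition above) =====
theorem find_indexes_for_duplicates_spec : Claim_equal_find_indexes_for_duplicates := by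
  intro records _ _
  unfold Spec_find_indexes_for_duplicates
  rw [pvA_eq, pvB_eq]
  set Aout := pvDup PySem.Set.empty (PySem.List.enumerate records) with hA
  set Bout := (PySem.Set.ofList ((pvE' records).map (fun p => p.1))).flatMap (pvG (pvE' records)) with hB
  have hperm : Aout.Perm Bout := pvPerm records
  have hpw : Aout.Pairwise (· < ·) :=
    pvDup_pairwise _ _ (PySem.List.pairwise_lt_enumerate records 0)
  set ys := PySem.List.sorted Aout (fun x => x) true with hys
  have h1 : ys.Perm Aout := PySem.List.sorted_perm Aout (fun x => x) true
  have hnd : ys.Nodup := h1.nodup_iff.mpr (hpw.imp (fun h => ne_of_lt h))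
  have h2 : ys.Pairwise (fun a b => b < a) := by
    have hle := PySem.List.sorted_pairwise_rev Aout (fun x => x)
    exact (hle.and hnd).imp (fun h => lt_of_le_of_ne h.1 h.2.symm)
  exact (PySem.List.sorted_rev_eq_of_perm_of_pairwise_gt Bout ys (fun x => x)
    (h1.trans hperm) h2).symm
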